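-- pv_equiv track=rewrite | github.com/IzarH/project_computer_vision_trajectory_mapping | code/integration/check_id.py | find_consecutive_id_index
-- ===== SOURCE A (Python) =====
-- def find_consecutive_id_index(id_list, target_id, consecutive_count=40):
--     """
--     Finds the last index of the first occurrence of `target_id` with `consecutive_count` consecutive appearances.
--     #skips the first 40!!!
--     Args:
--         id_list (list): List of IDs to search through.
--         target_id (int): The ID to find consecutive occurrences of.
--         consecutive_count (int): Number of consecutive occurrences to look for.
--
--     Returns:
--         int: The ending index of the first occurrence of `target_id` with `consecutive_count` consecutive appearances.
--               Returns -1 if not found.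
--     """
--     count = 0
--     start_index = -1
--
--     for index, id_value in enumerate(id_list[consecutive_count:]):
--         if id_value == target_id:
--             if count == 0:
--                 start_index = index  # Record the starting index of the sequence
--             count += 1
--
--             if count == consecutive_count:
--                 return index+consecutive_count  # Return the last index of the consecutive sequence
--         else:
--             count = 0
--             start_index = -1  # Reset start index if the sequence breaks
--
--     return -1
-- ===== SOURCE B (Python) =====
-- def find_consecutive_id_index(id_list, target_id, consecutive_count=40):
--     """Two-pointer scan over maximal runs instead of a stateful counter:
--     jump run by run and test each run's length at once."""
--     if consecutive_count < 1:
--         return -1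
--     tail = id_list[consecutive_count:]
--     n = len(tail)
--     i = 0
--     while i < n:
--         j = i
--         while j < n and tail[j] == tail[i]:
--             j += 1
--         if tail[i] == target_id and j - i >= consecutive_count:
--             return i + 2 * consecutive_count - 1
--         i = j
--     return -1
-- ===== Notes on version B (the rewrite author's own statement) =====
-- stated objective: alternative
-- what changed: Replaces the per-element counter-with-reset loop by a two-pointer scan over maximal runs: an inner pointer jumps to the end of each constant run and the run's length is tested once against the threshold.
import Mathlib
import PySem

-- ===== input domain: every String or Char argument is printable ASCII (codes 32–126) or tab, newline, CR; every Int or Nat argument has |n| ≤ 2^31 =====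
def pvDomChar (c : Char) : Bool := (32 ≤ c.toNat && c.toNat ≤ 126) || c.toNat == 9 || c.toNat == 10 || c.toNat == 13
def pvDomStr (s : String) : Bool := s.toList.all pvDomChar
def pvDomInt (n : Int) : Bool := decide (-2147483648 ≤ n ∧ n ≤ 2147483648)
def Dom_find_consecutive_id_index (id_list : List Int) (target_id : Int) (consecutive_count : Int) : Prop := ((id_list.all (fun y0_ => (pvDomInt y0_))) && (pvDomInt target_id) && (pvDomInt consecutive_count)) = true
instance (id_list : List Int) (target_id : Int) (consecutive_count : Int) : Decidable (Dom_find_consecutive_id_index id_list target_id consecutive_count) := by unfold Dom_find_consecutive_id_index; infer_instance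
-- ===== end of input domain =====

-- B replaces A's per-element counter-with-reset loop by a two-pointer scan over maximal
-- constant runs (alternative decomposition, same O(n) cost, proved return-value equal).

-- ===== PORT A =====
-- the for-loop of A: state = (index, count, start_index); early return becomes the returned value
def loopA (t c : Int) : List Int → Int → Int → Int → Int
  | [], _, _, _ => -1
  | v :: rest, index, count, start_index =>
    if v = t then
      let start_index' := if count = 0 then index else start_index
      if count + 1 = c then index + c
      else loopA t c rest (index + 1) (count + 1) start_index'
    else loopA t c rest (index + 1) 0 (-1)

def find_consecutive_id_index (id_list : List Int) (target_id : Int) (consecutive_count : Int) : Int :=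
  loopA target_id consecutive_count (PySem.List.slice id_list (some consecutive_count) none) 0 0 (-1)

-- ===== PORT B =====
-- inner while of B: advance j to the end of the run of value v
def innerB (tail : List Int) (v : Int) (j : Nat) : Nat :=
  if h : j < tail.length then
    if tail[j] = v then innerB tail v (j + 1) else j
  else j
termination_by tail.length - j

-- termination fact for the outer while: the inner while strictly advances
theorem innerB_gt (tail : List Int) (v : Int) (i : Nat) (h : i < tail.length) (hv : tail[i] = v) :
    i < innerB tail v i := by
  have hmono : ∀ j, j ≤ innerB tail v j := by
    intro j
    induction j using innerB.induct tail v with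
    | case1 j h hj ih => rw [innerB]; simp [h, hj]; omega
    | case2 j h hj => rw [innerB]; simp [h, hj]
    | case3 j h => rw [innerB]; simp [h]
  rw [innerB]; simp [h, hv]
  have := hmono (i + 1); omega

-- outer while of B
def outerB (tail : List Int) (t c : Int) (i : Nat) : Int :=
  if h : i < tail.length then
    let j := innerB tail (tail[i]) i
    if tail[i] = t ∧ c ≤ (j : Int) - (i : Int) then (i : Int) + 2 * c - 1
    else outerB tail t c j
  else -1
termination_by tail.length - i
decreasing_by
  have := innerB_gt tail (tail[i]) i h rfl
  omega

def find_consecutive_id_index_alt (id_list : List Int) (target_id : Int) (consecutive_count : Int) : Int :=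
  if consecutive_count < 1 then -1
  else outerB (PySem.List.slice id_list (some consecutive_count) none) target_id consecutive_count 0

-- ===== PRECONDITION & SPEC =====
def Spec_find_consecutive_id_index (id_list : List Int) (target_id : Int) (consecutive_count : Int) (out : Int) : Prop := out = find_consecutive_id_index_alt id_list target_id consecutive_count
instance (id_list : List Int) (target_id : Int) (consecutive_count : Int) (out : Int) : Decidable (Spec_find_consecutive_id_index id_list target_id consecutive_count out) := by unfold Spec_find_consecutive_id_index; infer_instance

-- ===== CLAIM (what is proved, stated in full; the proofs are below) =====
def Claim_equal_find_consecutive_id_index : Prop := ∀ (id_list : List Int) (target_id : Int) (consecutive_count : Int), Dom_find_consecutive_id_index id_list target_id consecutive_count → Spec_find_consecutive_id_index id_list target_id consecutive_count (find_consecutive_id_index id_list target_id consecutive_count)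

-- ===== LEMMAS AND PROOFS =====

-- start_index is dead state: loopA's result does not depend on it
theorem loopA_start_irrel (t c : Int) (l : List Int) : ∀ i k s s',
    loopA t c l i k s = loopA t c l i k s' := by
  induction l with
  | nil => intros; rfl
  | cons v rest ih =>
    intro i k s s'
    simp only [loopA]
    split_ifs <;> first | rfl | apply ih

-- with a non-positive threshold, A's count (kept ≥ 0) never reaches it
theorem loopA_nonpos (t c : Int) (hc : c ≤ 0) : ∀ (l : List Int) i k s, 0 ≤ k →
    loopA t c l i k s = -1 := by
  intro l
  induction l with
  | nil => intros; rfl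
  | cons v rest ih =>
    intro i k s hk
    simp only [loopA]
    split_ifs with h1 h2
    all_goals first | omega | exact ih _ _ _ (by omega)

-- a block of non-target values resets the counter and just advances the index
theorem loopA_block_ne (t c : Int) : ∀ (blk rest : List Int) (i k s : Int),
    blk ≠ [] → (∀ y ∈ blk, y ≠ t) →
    loopA t c (blk ++ rest) i k s = loopA t c rest (i + (blk.length : Int)) 0 (-1) := by
  intro blk
  induction blk with
  | nil => intro rest i k s h; exact absurd rfl h
  | cons b bs ih =>
    intro rest i k s _ hall
    have hb : b ≠ t := hall b (by simp)
    simp only [List.cons_append, loopA, if_neg hb]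
    by_cases hbs : bs = []
    · subst hbs
      simp only [List.nil_append, List.length_cons, List.length_nil]
      norm_num
    · rw [ih rest (i + 1) 0 (-1) hbs (fun y hy => hall y (by simp [hy]))]
      have : i + 1 + (bs.length : Int) = i + ((b :: bs).length : Int) := by
        simp [List.length_cons]; ring
      rw [this]

-- a block of target values counts up; it either reaches the threshold inside the
-- block (returning the trigger index) or exits the block with count = k + |blk|
theorem loopA_block_eq (t c : Int) : ∀ (blk rest : List Int) (i k s : Int),
    (∀ y ∈ blk, y = t) → 0 ≤ k → k < c →
    loopA t c (blk ++ rest) i k s =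
      if c ≤ k + (blk.length : Int) then i + (c - k - 1) + c
      else loopA t c rest (i + (blk.length : Int)) (k + (blk.length : Int)) 0 := by
  intro blk
  induction blk with
  | nil =>
    intro rest i k s _ hk hkc
    simp only [List.nil_append, List.length_nil]
    rw [if_neg (by omega)]
    simpa using loopA_start_irrel t c rest i k s 0
  | cons b bs ih =>
    intro rest i k s hall hk hkc
    have hb : b = t := hall b (by simp)
    simp only [List.cons_append, loopA, if_pos hb]
    by_cases hhit : k + 1 = c
    · rw [if_pos hhit, if_pos (by simp [List.length_cons]; omega)]
      omega
    · rw [if_neg hhit]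
      rw [ih rest (i + 1) (k + 1) _ (fun y hy => hall y (by simp [hy])) (by omega) (by omega)]
      have hlen : ((b :: bs).length : Int) = (bs.length : Int) + 1 := by
        simp [List.length_cons]
      by_cases hcond : c ≤ k + 1 + (bs.length : Int)
      · rw [if_pos hcond, if_pos (by omega)]; omega
      · rw [if_neg hcond, if_neg (by omega)]
        have h1 : i + 1 + (bs.length : Int) = i + ((b :: bs).length : Int) := by omega
        have h2 : k + 1 + (bs.length : Int) = k + ((b :: bs).length : Int) := by omega
        rw [h1, h2]

-- when the next element is not the target (or the list ends), a pending count is irrelevant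
theorem loopA_reset (t c : Int) (rest : List Int) (i k s s' : Int)
    (h : rest = [] ∨ ∃ y ys, rest = y :: ys ∧ y ≠ t) :
    loopA t c rest i k s = loopA t c rest i 0 s' := by
  rcases h with h | ⟨y, ys, rfl, hy⟩
  · subst h; rfl
  · simp only [loopA, if_neg hy]

-- the inner while computes the end of the maximal run of v starting at j
theorem innerB_char (tail : List Int) (v : Int) (j : Nat) :
    innerB tail v j = j + ((tail.drop j).takeWhile (fun y => y == v)).length := by
  induction j using innerB.induct tail v with
  | case1 j h hj ih =>
    rw [innerB]; simp only [h, hj, dite_true, if_pos]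
    rw [List.drop_eq_getElem_cons h, List.takeWhile_cons_of_pos (by simp [hj])]
    simp only [List.length_cons]
    omega
  | case2 j h hj =>
    rw [innerB]; simp only [h, dite_true, if_neg hj]
    rw [List.drop_eq_getElem_cons h, List.takeWhile_cons_of_neg (by simp [hj])]
    simp
  | case3 j h =>
    rw [innerB]
    simp only [h, dite_false]
    rw [List.drop_eq_nil_of_le (by omega)]
    simp

-- the heart of the proof: B's run-by-run scan from position i computes exactly what
-- A's counter loop computes on the remaining suffix, for a positive threshold
theorem outerB_eq (t c : Int) (hc : 1 ≤ c) (tail : List Int) (i : Nat) (s : Int) :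
    i ≤ tail.length → outerB tail t c i = loopA t c (tail.drop i) (i : Int) 0 s := by
  induction i using outerB.induct tail t c with
  | case1 i h j hcond =>
    intro _
    rw [outerB]; simp only [h, dite_true]
    have hjdef : innerB tail tail[i] i = j := rfl
    rw [hjdef, if_pos hcond]
    obtain ⟨hx, hlen⟩ := hcond
    -- decompose the suffix into its leading run and the rest
    have hdec := List.takeWhile_append_dropWhile (p := fun y => y == tail[i]) (l := tail.drop i)
    set blk := (tail.drop i).takeWhile (fun y => y == tail[i]) with hblk
    have hj : j = i + blk.length := innerB_char tail tail[i] i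
    have hall : ∀ y ∈ blk, y = t := fun y hy => by
      have := List.mem_takeWhile_imp hy; simp at this; omega
    rw [← hdec, loopA_block_eq t c blk _ _ 0 s hall le_rfl (by omega),
        if_pos (by omega)]
    omega
  | case2 i h j hcond ih =>
    intro hi
    rw [outerB]; simp only [h, dite_true]
    have hjdef : innerB tail tail[i] i = j := rfl
    rw [hjdef, if_neg hcond]
    have hdec := List.takeWhile_append_dropWhile (p := fun y => y == tail[i]) (l := tail.drop i)
    set blk := (tail.drop i).takeWhile (fun y => y == tail[i]) with hblk
    set rest := (tail.drop i).dropWhile (fun y => y == tail[i]) with hrest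
    have hj : j = i + blk.length := innerB_char tail tail[i] i
    have hblk_ne : blk ≠ [] := by
      rw [hblk, List.drop_eq_getElem_cons h, List.takeWhile_cons_of_pos (by simp)]
      simp
    have hjle : j ≤ tail.length := by
      have h1 : blk.length ≤ (tail.drop i).length := by
        rw [hblk]; exact (List.takeWhile_sublist _).length_le
      have h2 := List.length_drop (l := tail) (i := i)
      omega
    have hdropj : tail.drop j = rest := by
      rw [hj, ← List.drop_drop, ← hdec, List.drop_left]
    by_cases hx : tail[i] = t
    · -- target run too short: counter exits the block and is then reset
      have hlt : ¬ c ≤ (j : Int) - (i : Int) := fun hh => hcond ⟨hx, hh⟩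
      have hall : ∀ y ∈ blk, y = t := fun y hy => by
        have := List.mem_takeWhile_imp hy; simp at this; omega
      rw [← hdec, loopA_block_eq t c blk rest _ 0 s hall le_rfl (by omega),
        if_neg (show ¬ c ≤ 0 + (blk.length : Int) by omega)]
      have hreset : rest = [] ∨ ∃ y ys, rest = y :: ys ∧ y ≠ t := by
        cases hr : rest with
        | nil => exact Or.inl rfl
        | cons y ys =>
          refine Or.inr ⟨y, ys, rfl, ?_⟩
          have hd : (tail.drop i).dropWhile (fun y => y == tail[i]) = y :: ys := hrest.symm.trans hr
          have := List.head_dropWhile_not (fun y => y == tail[i]) (l := tail.drop i) (by simp [hd])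
          simp only [hd, List.head_cons] at this
          simp at this; omega
      rw [loopA_reset t c rest _ _ 0 s hreset]
      rw [ih hjle, hdropj]
      congr 1
      omega
    · -- non-target run: A resets across the whole block
      have hall : ∀ y ∈ blk, y ≠ t := fun y hy => by
        have := List.mem_takeWhile_imp hy; simp at this; omega
      rw [← hdec, loopA_block_ne t c blk rest _ 0 s hblk_ne hall]
      rw [loopA_start_irrel t c rest _ 0 (-1) s]
      rw [ih hjle, hdropj]
      congr 1
      omega
  | case3 i h =>
    intro hi
    have : i = tail.length := by omega
    rw [outerB]
    simp only [h, dite_false]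
    rw [this, List.drop_length]
    rfl

-- ===== VERDICT (by name: the statement is the Claim_ definition above) =====
theorem find_consecutive_id_index_spec : Claim_equal_find_consecutive_id_index := by
  intro id_list target_id consecutive_count _
  unfold Spec_find_consecutive_id_index find_consecutive_id_index find_consecutive_id_index_alt
  by_cases hc : consecutive_count < 1
  · rw [if_pos hc]
    exact loopA_nonpos target_id consecutive_count (by omega) _ 0 0 (-1) le_rfl
  · rw [if_neg hc]
    have := outerB_eq target_id consecutive_count (by omega)
      (PySem.List.slice id_list (some consecutive_count) none) 0 (-1) (by omega)
    rw [this]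
    simp
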